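-- pv_equiv track=rewrite | github.com/ephrem-ketachew/data-structure-and-algorithms | adjacent-swap.py | minSwaps
-- ===== SOURCE A (Python) =====
-- from typing import List
--
-- def minSwaps(nums: List[int]) -> int:
--     even_indices = [index for index, num in enumerate(nums) if num % 2 == 0]
--     odd_indices = [index for index, num in enumerate(nums) if num % 2]
--
--     if abs(len(even_indices) - len(odd_indices)) > 1: return -1
--
--     def __minSwap(start_with_even: bool) -> int:
--         target_indices = range(0, len(nums), 2)
--         swap_count = 0
--
--         if start_with_even:
--             swap_count = sum(abs(t - e) for e, t in zip(even_indices, target_indices))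
--         else:
--             swap_count = sum(abs(t - o) for o, t in zip(odd_indices, target_indices))
--
--         return swap_count
--
--     if(len(even_indices) > len(odd_indices)):
--         return __minSwap(True)
--     elif(len(even_indices) < len(odd_indices)):
--         return __minSwap(False)
--     else:
--         return min(__minSwap(True), __minSwap(False))
-- ===== SOURCE B (Python) =====
-- from typing import List
--
-- def minSwaps(nums: List[int]) -> int:
--     # Prefix-imbalance (CDF) formulation: the swap cost for a parity equals the
--     # sum over prefixes of |#elements of that parity seen - #slots passed|,
--     # where the number of slots in the first i+1 positions is i//2 + 1.
--     evens = odds = 0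
--     bal_even = bal_odd = 0
--     for i, x in enumerate(nums):
--         if x % 2 == 0:
--             evens += 1
--         else:
--             odds += 1
--         slots = i // 2 + 1
--         bal_even += abs(evens - slots)
--         bal_odd += abs(odds - slots)
--     if abs(evens - odds) > 1:
--         return -1
--     if evens > odds:
--         return bal_even
--     if odds > evens:
--         return bal_odd
--     return min(bal_even, bal_odd)
-- ===== Notes on version B (the rewrite author's own statement) =====
-- stated objective: alternative
-- what changed: Replaces A's position-based computation (collect even/odd index lists, zip each against target positions 0,2,4,... and sum per-element distances) by the Wasserstein/CDF formulation: a single pass that never looks at element positions or targets, accumulating at each prefix the absolute imbalance between the parity count seen so far and the number of slots i//2+1 passed; the proved identity is sum_k |e_k - 2k| = sum_i |count(i) - (i//2+1)| in the reachable branches.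
import Mathlib
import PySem

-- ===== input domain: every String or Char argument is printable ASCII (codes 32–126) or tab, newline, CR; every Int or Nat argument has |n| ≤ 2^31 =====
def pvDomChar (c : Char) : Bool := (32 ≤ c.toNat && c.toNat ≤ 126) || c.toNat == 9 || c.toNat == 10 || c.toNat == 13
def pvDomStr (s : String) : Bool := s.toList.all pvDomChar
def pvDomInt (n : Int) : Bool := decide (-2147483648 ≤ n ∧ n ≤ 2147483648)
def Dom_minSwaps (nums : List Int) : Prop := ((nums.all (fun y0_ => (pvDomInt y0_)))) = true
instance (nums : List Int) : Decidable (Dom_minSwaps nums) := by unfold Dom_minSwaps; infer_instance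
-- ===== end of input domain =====

-- B replaces A's position-based sums (index lists zipped against targets 0,2,4,…) by a
-- prefix-imbalance (CDF) scan that never uses element positions; objective: alternative.

-- ===== PORT A =====
def minSwaps (nums : List Int) : Int :=
  let evenIndices := ((PySem.List.enumerate nums).filter (fun p => PySem.Int.mod p.2 2 == 0)).map (fun p => p.1)
  let oddIndices := ((PySem.List.enumerate nums).filter (fun p => !(PySem.Int.mod p.2 2 == 0))).map (fun p => p.1)
  if ((evenIndices.length : Int) - (oddIndices.length : Int)).natAbs > 1 then -1
  else
    let minSwap := fun (startWithEven : Bool) =>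
      let targetIndices := PySem.List.pyRange 0 nums.length 2
      if startWithEven then
        ((evenIndices.zip targetIndices).map (fun p => |p.2 - p.1|)).sum
      else
        ((oddIndices.zip targetIndices).map (fun p => |p.2 - p.1|)).sum
    if evenIndices.length > oddIndices.length then minSwap true
    else if evenIndices.length < oddIndices.length then minSwap false
    else min (minSwap true) (minSwap false)

-- ===== PORT B =====
def minSwapsAltStep (st : Int × Int × Int × Int) (p : Int × Int) : Int × Int × Int × Int :=
  let evens := if PySem.Int.mod p.2 2 == 0 then st.1 + 1 else st.1
  let odds := if PySem.Int.mod p.2 2 == 0 then st.2.1 else st.2.1 + 1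
  let slots := PySem.Int.floordiv p.1 2 + 1
  (evens, odds, st.2.2.1 + |evens - slots|, st.2.2.2 + |odds - slots|)

def minSwaps_alt (nums : List Int) : Int :=
  let s := (PySem.List.enumerate nums).foldl minSwapsAltStep (0, 0, 0, 0)
  if (s.1 - s.2.1).natAbs > 1 then -1
  else if s.1 > s.2.1 then s.2.2.1
  else if s.2.1 > s.1 then s.2.2.2
  else min s.2.2.1 s.2.2.2

-- ===== PRECONDITION & SPEC =====
def Spec_minSwaps (nums : List Int) (out : Int) : Prop := out = minSwaps_alt nums
instance (nums : List Int) (out : Int) : Decidable (Spec_minSwaps nums out) := by unfold Spec_minSwaps; infer_instance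

-- ===== CLAIM (what is proved, stated in full; the proofs are below) =====
def Claim_equal_minSwaps : Prop := ∀ (nums : List Int), Dom_minSwaps nums → Spec_minSwaps nums (minSwaps nums)

-- ===== LEMMAS AND PROOFS =====

-- A-side characterisation: cost of matching an index list against targets a, a+2, a+4, …
def pvCostFrom : List Int → Int → Int
  | [], _ => 0
  | i :: is, a => |a - i| + pvCostFrom is (a + 2)

def pvEvens (xs : List Int) (s : Int) : List Int :=
  ((PySem.List.enumerate xs s).filter (fun p => PySem.Int.mod p.2 2 == 0)).map (fun p => p.1)

def pvOdds (xs : List Int) (s : Int) : List Int :=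
  ((PySem.List.enumerate xs s).filter (fun p => !(PySem.Int.mod p.2 2 == 0))).map (fun p => p.1)

-- correction term: pvG L = Σ_{u<L} (⌊u/2⌋+1), 0 for L ≤ 0
def pvGN : Nat → Int
  | 0 => 0
  | n + 1 => pvGN n + ((n : Int) / 2 + 1)

def pvG (L : Int) : Int := pvGN L.toNat

lemma pvG_nonpos (L : Int) (h : L ≤ 0) : pvG L = 0 := by
  unfold pvG
  rw [show L.toNat = 0 by omega]
  rfl

lemma pvG_succ (L : Int) (h : 1 ≤ L) : pvG L = pvG (L - 1) + ((L - 1) / 2 + 1) := by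
  unfold pvG
  rw [show L.toNat = (L - 1).toNat + 1 by omega]
  show pvGN _ + _ = _
  rw [Int.toNat_of_nonneg (show (0:Int) ≤ L - 1 by omega)]

-- step identities for the correction terms (pure integer arithmetic)
lemma star_even (n m C : Int) :
    C + pvG (n - 2*m) - pvG (2*m - 2 - n) + |m + 1 - (n/2 + 1)|
      = C + |2*m - n| + pvG (n - 2*m - 1) - pvG (2*m - 1 - n) := by
  by_cases h1 : 1 ≤ n - 2*m
  · have g1 := pvG_succ (n - 2*m) h1
    have g2 := pvG_nonpos (2*m - 2 - n) (by omega)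
    have g3 := pvG_nonpos (2*m - 1 - n) (by omega)
    simp only [Int.abs_eq_natAbs] at *
    omega
  · by_cases h3 : 1 ≤ 2*m - 1 - n
    · have g4 := pvG_succ (2*m - 1 - n) h3
      rw [show 2*m - 1 - n - 1 = 2*m - 2 - n from by ring] at g4
      have g5 := pvG_nonpos (n - 2*m) (by omega)
      have g6 := pvG_nonpos (n - 2*m - 1) (by omega)
      simp only [Int.abs_eq_natAbs] at *
      omega
    · have g1 := pvG_nonpos (n - 2*m) (by omega)
      have g2 := pvG_nonpos (n - 2*m - 1) (by omega)
      have g3 := pvG_nonpos (2*m - 2 - n) (by omega)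
      have g4 := pvG_nonpos (2*m - 1 - n) (by omega)
      simp only [Int.abs_eq_natAbs] at *
      omega

lemma star_odd (n m C : Int) :
    C + pvG (n - 2*m) - pvG (2*m - 2 - n) + |m - (n/2 + 1)|
      = C + pvG (n - 2*m + 1) - pvG (2*m - 3 - n) := by
  by_cases h1 : 0 ≤ n - 2*m
  · have g1 := pvG_succ (n - 2*m + 1) (by omega)
    rw [show n - 2*m + 1 - 1 = n - 2*m from by ring] at g1
    have g2 := pvG_nonpos (2*m - 2 - n) (by omega)
    have g3 := pvG_nonpos (2*m - 3 - n) (by omega)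
    simp only [Int.abs_eq_natAbs] at *
    omega
  · by_cases h3 : 1 ≤ 2*m - 2 - n
    · have g4 := pvG_succ (2*m - 2 - n) h3
      rw [show 2*m - 2 - n - 1 = 2*m - 3 - n from by ring] at g4
      have g5 := pvG_nonpos (n - 2*m) (by omega)
      have g6 := pvG_nonpos (n - 2*m + 1) (by omega)
      simp only [Int.abs_eq_natAbs] at *
      omega
    · have g1 := pvG_nonpos (n - 2*m) (by omega)
      have g2 := pvG_nonpos (n - 2*m + 1) (by omega)
      have g3 := pvG_nonpos (2*m - 2 - n) (by omega)
      have g4 := pvG_nonpos (2*m - 3 - n) (by omega)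
      simp only [Int.abs_eq_natAbs] at *
      omega

lemma pyRange_two_nil (a b : Int) (h : b ≤ a) : PySem.List.pyRange a b 2 = [] := by
  rw [PySem.List.pyRange_of_pos a b (by norm_num)]
  simp [show ¬ a < b by omega]

lemma pyRange_two_cons (a b : Int) (h : a < b) :
    PySem.List.pyRange a b 2 = a :: PySem.List.pyRange (a + 2) b 2 := by
  rw [PySem.List.pyRange_of_pos a b (by norm_num), PySem.List.pyRange_of_pos (a+2) b (by norm_num)]
  by_cases h2 : a + 2 < b
  · rw [if_pos h, if_pos h2]
    have : ((b - a + 2 - 1) / 2).toNat = ((b - (a+2) + 2 - 1) / 2).toNat + 1 := by omega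
    rw [this, List.range_succ_eq_map]
    simp [Function.comp_def]
    intro k _; ring
  · rw [if_pos h, if_neg h2]
    have : ((b - a + 2 - 1) / 2).toNat = 1 := by omega
    rw [this]
    simp

lemma length_pyRange_two (a b : Int) :
    (PySem.List.pyRange a b 2).length = (if a < b then ((b - a + 1) / 2).toNat else 0) := by
  rw [PySem.List.pyRange_of_pos a b (by norm_num)]
  simp only [List.length_map, List.length_range]
  split_ifs with h
  · congr 1; omega
  · rfl

lemma zipsum_eq_costFrom : ∀ (is : List Int) (a b : Int),
    is.length ≤ (PySem.List.pyRange a b 2).length →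
    ((is.zip (PySem.List.pyRange a b 2)).map (fun p => |p.2 - p.1|)).sum = pvCostFrom is a := by
  intro is
  induction is with
  | nil => intro a b h; simp [pvCostFrom]
  | cons i is ih =>
    intro a b h
    have hab : a < b := by
      by_contra hc
      rw [pyRange_two_nil a b (by omega)] at h
      simp at h
    rw [pyRange_two_cons a b hab] at h ⊢
    simp only [List.zip_cons_cons, List.map_cons, List.sum_cons, pvCostFrom]
    rw [ih (a+2) b (by simpa using h)]

lemma pvCostFrom_append : ∀ (is : List Int) (j a : Int),
    pvCostFrom (is ++ [j]) a = pvCostFrom is a + |a + 2 * is.length - j| := by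
  intro is
  induction is with
  | nil => intro j a; simp [pvCostFrom]
  | cons i is ih =>
    intro j a
    simp only [List.cons_append, pvCostFrom, ih, List.length_cons]
    push_cast
    ring_nf

lemma pvEvens_append (xs : List Int) (x : Int) (s : Int) :
    pvEvens (xs ++ [x]) s
      = pvEvens xs s ++ (if PySem.Int.mod x 2 == 0 then [s + xs.length] else []) := by
  unfold pvEvens
  rw [PySem.List.enumerate_append, List.filter_append, List.map_append]
  have hm : PySem.Int.mod x 2 = x % 2 := PySem.Int.mod_eq_emod_of_pos (by norm_num)
  by_cases hx : x % 2 = 0 <;>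
    simp [PySem.List.enumerate_cons, PySem.List.enumerate_nil, hm, hx, Int.emod_emod_of_dvd,
      Int.dvd_iff_emod_eq_zero] <;> omega

lemma pvOdds_append (xs : List Int) (x : Int) (s : Int) :
    pvOdds (xs ++ [x]) s
      = pvOdds xs s ++ (if PySem.Int.mod x 2 == 0 then [] else [s + xs.length]) := by
  unfold pvOdds
  rw [PySem.List.enumerate_append, List.filter_append, List.map_append]
  have hm : PySem.Int.mod x 2 = x % 2 := PySem.Int.mod_eq_emod_of_pos (by norm_num)
  by_cases hx : x % 2 = 0 <;>
    simp [PySem.List.enumerate_cons, PySem.List.enumerate_nil, hm, hx, Int.emod_emod_of_dvd,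
      Int.dvd_iff_emod_eq_zero] <;> omega

lemma evens_add_odds_length (xs : List Int) (s : Int) :
    (pvEvens xs s).length + (pvOdds xs s).length = xs.length := by
  simp only [pvEvens, pvOdds, List.length_map]
  rw [← List.length_eq_length_filter_add
    (l := PySem.List.enumerate xs s) (fun p => PySem.Int.mod p.2 2 == 0)]
  simp [PySem.List.length_enumerate]

-- THE KEY IDENTITY (universal, no side condition): B's running imbalance sums equal
-- A's position-vs-target sums up to corrections pvG(n-2m) - pvG(2m-2-n), which vanish
-- in every branch that is actually returned.
lemma bfold (xs : List Int) :
    (PySem.List.enumerate xs).foldl minSwapsAltStep (0, 0, 0, 0)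
      = (((pvEvens xs 0).length : Int), ((pvOdds xs 0).length : Int),
         pvCostFrom (pvEvens xs 0) 0
           + pvG ((xs.length : Int) - 2 * (pvEvens xs 0).length)
           - pvG (2 * (pvEvens xs 0).length - 2 - xs.length),
         pvCostFrom (pvOdds xs 0) 0
           + pvG ((xs.length : Int) - 2 * (pvOdds xs 0).length)
           - pvG (2 * (pvOdds xs 0).length - 2 - xs.length)) := by
  induction xs using List.reverseRecOn with
  | nil => decide
  | append_singleton xs x ih =>
    rw [PySem.List.enumerate_append, List.foldl_append, ih]
    simp only [PySem.List.enumerate_cons, PySem.List.enumerate_nil, List.foldl_cons, List.foldl_nil]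
    rw [pvEvens_append, pvOdds_append]
    have hfd : PySem.Int.floordiv (0 + (xs.length : Int)) 2 = (xs.length : Int) / 2 := by
      rw [PySem.Int.floordiv_eq_ediv_of_pos (by norm_num)]; omega
    have hm : PySem.Int.mod x 2 = x % 2 := PySem.Int.mod_eq_emod_of_pos (by norm_num)
    by_cases hx : PySem.Int.mod x 2 == 0
    · simp only [hx, if_true, minSwapsAltStep, List.length_append, List.length_cons,
        List.length_nil, pvCostFrom_append, List.append_nil, hfd]
      refine Prod.ext ?_ (Prod.ext ?_ (Prod.ext ?_ ?_))
      · dsimp only; try push_cast; try ring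
      · dsimp only; try push_cast; try ring
      · dsimp only
        have h := star_even ((xs.length : Int)) (((pvEvens xs 0).length : Int))
          (pvCostFrom (pvEvens xs 0) 0)
        simp only [Int.abs_eq_natAbs] at h ⊢
        push_cast at h ⊢
        ring_nf at h ⊢
        omega
      · dsimp only
        have h := star_odd ((xs.length : Int)) (((pvOdds xs 0).length : Int))
          (pvCostFrom (pvOdds xs 0) 0)
        simp only [Int.abs_eq_natAbs] at h ⊢
        push_cast at h ⊢
        ring_nf at h ⊢
        omega
    · simp only [hx, if_false, Bool.false_eq_true, if_true, minSwapsAltStep,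
        List.length_append, List.length_cons, List.length_nil, pvCostFrom_append,
        List.append_nil, hfd]
      refine Prod.ext ?_ (Prod.ext ?_ (Prod.ext ?_ ?_))
      · dsimp only; try push_cast; try ring
      · dsimp only; try push_cast; try ring
      · dsimp only
        have h := star_odd ((xs.length : Int)) (((pvEvens xs 0).length : Int))
          (pvCostFrom (pvEvens xs 0) 0)
        simp only [Int.abs_eq_natAbs] at h ⊢
        push_cast at h ⊢
        ring_nf at h ⊢
        omega
      · dsimp only
        have h := star_even ((xs.length : Int)) (((pvOdds xs 0).length : Int))
          (pvCostFrom (pvOdds xs 0) 0)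
        simp only [Int.abs_eq_natAbs] at h ⊢
        push_cast at h ⊢
        ring_nf at h ⊢
        omega

theorem pvMain (nums : List Int) : minSwaps nums = minSwaps_alt nums := by
  have hfold := bfold nums
  have hlen := evens_add_odds_length nums 0
  have htlen := length_pyRange_two 0 (nums.length)
  simp only [minSwaps, minSwaps_alt]
  rw [hfold]
  simp only [pvEvens, pvOdds] at hlen ⊢ hfold
  set E := ((PySem.List.enumerate nums 0).filter (fun p => PySem.Int.mod p.2 2 == 0)).map (fun p => p.1) with hE
  set O := ((PySem.List.enumerate nums 0).filter (fun p => !(PySem.Int.mod p.2 2 == 0))).map (fun p => p.1) with hO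
  have htn : (PySem.List.pyRange 0 (nums.length : Int) 2).length = (nums.length + 1) / 2 := by
    split_ifs at htlen <;> omega
  have hsum1 : E.length ≤ (PySem.List.pyRange 0 (nums.length : Int) 2).length →
      ((E.zip (PySem.List.pyRange 0 (nums.length : Int) 2)).map (fun p => |p.2 - p.1|)).sum
        = pvCostFrom E 0 := fun h => zipsum_eq_costFrom E 0 _ h
  have hsum2 : O.length ≤ (PySem.List.pyRange 0 (nums.length : Int) 2).length →
      ((O.zip (PySem.List.pyRange 0 (nums.length : Int) 2)).map (fun p => |p.2 - p.1|)).sum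
        = pvCostFrom O 0 := fun h => zipsum_eq_costFrom O 0 _ h
  by_cases hbad : ((E.length : Int) - (O.length : Int)).natAbs > 1
  · rw [if_pos hbad, if_pos hbad]
  · rw [if_neg hbad, if_neg hbad]
    by_cases h1 : E.length > O.length
    · rw [if_pos h1, if_pos (show ((E.length : Int)) > ((O.length : Int)) from by omega)]
      rw [hsum1 (by omega),
        pvG_nonpos ((nums.length : Int) - 2 * (E.length : Int)) (by omega),
        pvG_nonpos (2 * (E.length : Int) - 2 - (nums.length : Int)) (by omega)]
      simp
    · rw [if_neg h1, if_neg (show ¬(((E.length : Int)) > ((O.length : Int))) from by omega)]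
      by_cases h2 : E.length < O.length
      · rw [if_pos h2, if_pos (show ((O.length : Int)) > ((E.length : Int)) from by omega)]
        rw [hsum2 (by omega),
          pvG_nonpos ((nums.length : Int) - 2 * (O.length : Int)) (by omega),
          pvG_nonpos (2 * (O.length : Int) - 2 - (nums.length : Int)) (by omega)]
        simp
      · rw [if_neg h2, if_neg (show ¬(((O.length : Int)) > ((E.length : Int))) from by omega)]
        rw [hsum1 (by omega), hsum2 (by omega),
          pvG_nonpos ((nums.length : Int) - 2 * (E.length : Int)) (by omega),
          pvG_nonpos (2 * (E.length : Int) - 2 - (nums.length : Int)) (by omega),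
          pvG_nonpos ((nums.length : Int) - 2 * (O.length : Int)) (by omega),
          pvG_nonpos (2 * (O.length : Int) - 2 - (nums.length : Int)) (by omega)]
        simp

-- ===== VERDICT (by name: the statement is the Claim_ definition above) =====
theorem minSwaps_spec : Claim_equal_minSwaps := by
  intro nums _
  unfold Spec_minSwaps
  exact pvMain nums
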